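-- pv_equiv track=rewrite | github.com/SebastianVintonuke/TDA-Test | ProgramacionDinamica/numeros_posibles.py | c_optimos
-- ===== SOURCE A (Python) =====
-- NUMEROS_ALCANZABLES_DESDE = {
--     0: [8],
--     1: [2,4],
--     2: [3,5,1],
--     3: [6,2],
--     4: [1,5,7],
--     5: [2,6,8,4],
--     6: [9,5,3],
--     7: [4,8],
--     8: [5,9,0,7],
--     9: [8,6],
-- }
--
-- def c_optimos(n):
--     optimos = [ [ 0 for _ in range(n+1) ] for _ in range(9+1) ] # 0(n)
--
--     for numero in range(9+1): # 0(1)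
--         optimos[numero][0] = 0
--         if n >= 1:
--             optimos[numero][1] = 1
--
--     for longitud in range(2, n+1): # 0(n)
--         for numero in range(9+1): # 0(1)
--             optimos[numero][longitud] = sum([ optimos[numero_alcanzable][longitud-1] for numero_alcanzable in NUMEROS_ALCANZABLES_DESDE[numero] ])
--
--     return optimos
-- ===== SOURCE B (Python) =====
-- def c_optimos(n):
--     # Keypad knight graph is symmetric under the 1<->3, 4<->6, 7<->9 mirror, so the
--     # ten per-digit counts collapse to seven scalar sequences
--     # (a=count at 1 or 3, b=7 or 9, c=4 or 6, p=2, q=8, z=0, m=5).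
--     states = [[0] * 7]
--     if n >= 1:
--         states.append([1] * 7)
--         for _ in range(2, n + 1):
--             a, b, c, p, q, z, m = states[-1]
--             states.append([p + c, c + q, a + m + b, 2 * a + m, 2 * b + m + z, q, p + q + 2 * c])
--     var_of = [5, 0, 3, 0, 2, 6, 2, 1, 4, 1]  # digit -> position of its scalar in a state
--     return [[s[var_of[d]] for s in states] for d in range(10)]
-- ===== Notes on version B (the rewrite author's own statement) =====
-- stated objective: alternative
-- what changed: Replaces A's 10-row pull-style DP over the adjacency dict with a symmetry-reduced recurrence: the keypad graph's mirror symmetry (1~3, 4~6, 7~9) collapses the ten per-digit counts to seven scalar sequences iterated by a closed arithmetic recurrence with no graph traversal, which are then expanded back to the ten rows.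
import Mathlib
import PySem

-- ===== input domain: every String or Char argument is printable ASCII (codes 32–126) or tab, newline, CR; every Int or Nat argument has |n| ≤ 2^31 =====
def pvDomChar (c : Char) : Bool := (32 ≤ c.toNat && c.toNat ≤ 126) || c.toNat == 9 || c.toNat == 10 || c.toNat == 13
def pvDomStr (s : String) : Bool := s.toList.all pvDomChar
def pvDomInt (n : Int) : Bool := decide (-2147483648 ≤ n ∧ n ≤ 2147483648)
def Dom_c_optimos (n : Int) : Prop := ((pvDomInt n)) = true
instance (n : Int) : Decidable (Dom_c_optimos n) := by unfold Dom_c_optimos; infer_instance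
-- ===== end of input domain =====

-- B replaces A's 10-row DP over the adjacency dict by a symmetry-reduced 7-scalar
-- arithmetic recurrence (mirror symmetry 1~3, 4~6, 7~9), expanded back to ten rows at the end.


-- ===== PORT A =====
-- NUMEROS_ALCANZABLES_DESDE (the dict lookup always hits: keys are exactly 0..9)
def adj : Int → List Int := fun d =>
  if d = 0 then [8] else if d = 1 then [2,4] else if d = 2 then [3,5,1]
  else if d = 3 then [6,2] else if d = 4 then [1,5,7] else if d = 5 then [2,6,8,4]
  else if d = 6 then [9,5,3] else if d = 7 then [4,8] else if d = 8 then [5,9,0,7]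
  else if d = 9 then [8,6] else []

-- optimos[i][j] read / write (all indices reached inside Pre_ are in range)
def tGet (t : List (List Int)) (i j : Nat) : Int := (t.getD i []).getD j 0
def tSet (t : List (List Int)) (i j : Nat) (v : Int) : List (List Int) :=
  t.modify i (fun r => r.set j v)

def c_optimos (n : Int) : List (List Int) :=
  let init := List.replicate 10 (List.replicate (n+1).toNat (0:Int))
  let t1 := (List.range 10).foldl (fun t numero =>
      let t' := tSet t numero 0 0
      if 1 ≤ n then tSet t' numero 1 1 else t') init
  (PySem.List.pyRange 2 (n+1) 1).foldl (fun t longitud =>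
      (List.range 10).foldl (fun t numero =>
        tSet t numero longitud.toNat
          (((adj (numero : Int)).map (fun a => tGet t a.toNat (longitud-1).toNat)).sum)) t) t1

-- ===== PORT B =====
-- digit -> position of its scalar in a state [a,b,c,p,q,z,m]
def varOf : List Nat := [5,0,3,0,2,6,2,1,4,1]

def c_optimos_alt (n : Int) : List (List Int) :=
  let states0 : List (List Int) := [List.replicate 7 0]
  let states : List (List Int) :=
    if 1 ≤ n then
      (PySem.List.pyRange 2 (n+1) 1).foldl (fun sts _ =>
        let s := sts.getLast!
        let a := s.getD 0 0
        let b := s.getD 1 0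
        let c := s.getD 2 0
        let p := s.getD 3 0
        let q := s.getD 4 0
        let z := s.getD 5 0
        let m := s.getD 6 0
        sts ++ [[p+c, c+q, a+m+b, 2*a+m, 2*b+m+z, q, p+q+2*c]])
        (states0 ++ [List.replicate 7 1])
    else states0
  (List.range 10).map (fun d => states.map (fun s => s.getD (varOf.getD d 0) 0))

-- ===== PRECONDITION & SPEC =====
-- Pre_ excludes n < 0, where A raises IndexError (every row is built with length 0).
def Pre_c_optimos (n : Int) : Prop := 0 ≤ n
instance (n : Int) : Decidable (Pre_c_optimos n) := by unfold Pre_c_optimos; infer_instance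
def pvWitness_c_optimos : Int := 3

def Spec_c_optimos (n : Int) (out : List (List Int)) : Prop := out = c_optimos_alt n
instance (n : Int) (out : List (List Int)) : Decidable (Spec_c_optimos n out) := by unfold Spec_c_optimos; infer_instance

-- ===== CLAIM (what is proved, stated in full; the proofs are below) =====
def Claim_equal_c_optimos : Prop := ∀ (n : Int), Dom_c_optimos n → Pre_c_optimos n → Spec_c_optimos n (c_optimos n)

-- ===== LEMMAS AND PROOFS =====

theorem set_map_range (m j : Nat) (h : Nat → Int) (v : Int) :
    ((List.range m).map h).set j v = (List.range m).map (fun L => if L = j then v else h L) := by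
  apply List.ext_getElem <;> simp [List.getElem_set]
  intro i _
  split_ifs <;> first | rfl | omega

theorem modify_map_range (K i : Nat) (h : Nat → List Int) (g : List Int → List Int) :
    ((List.range K).map h).modify i g = (List.range K).map (fun d => if d = i then g (h d) else h d) := by
  apply List.ext_getElem <;> simp [List.getElem_modify]
  intro i _
  split_ifs <;> first | rfl | omega

theorem foldl_modify (K : Nat) (h : Nat → List Int) (op : Nat → List Int → List Int)
    (f : List (List Int) → Nat → List (List Int)) (hf : ∀ t d, f t d = t.modify d (op d)) :
    ∀ k, k ≤ K → (List.range k).foldl f ((List.range K).map h) =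
      (List.range K).map (fun d => if d < k then op d (h d) else h d) := by
  intro k
  induction k with
  | zero => intro _; simp
  | succ k ih =>
    intro hk
    rw [List.range_succ, List.foldl_append, ih (by omega)]
    simp only [List.foldl_cons, List.foldl_nil, hf, modify_map_range]
    apply List.map_congr_left
    intro d hd
    simp only [List.mem_range] at hd
    by_cases h1 : d = k
    · subst h1; simp
    · by_cases h2 : d < k <;> simp [h1, h2] <;> omega

def f : Nat → Nat → Int
  | 0, _ => 0
  | 1, _ => 1
  | (k+2), d => ((adj d).map (fun a => f (k+1) a.toNat)).sum

theorem f_succ (ℓ : Nat) (hℓ : 1 ≤ ℓ) (d : Nat) :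
    f (ℓ+1) d = ((adj d).map (fun a => f ℓ a.toNat)).sum := by
  obtain ⟨k, rfl⟩ : ∃ k, ℓ = k+1 := ⟨ℓ-1, by omega⟩
  rfl

def specRow (m ℓ d : Nat) : List Int := (List.range m).map (fun L => if L ≤ ℓ then f L d else 0)

def specTab (m ℓ : Nat) : List (List Int) := (List.range 10).map (specRow m ℓ)

theorem adj_mem_bounds (d : Nat) (a : Int) (ha : a ∈ adj (d : Int)) : 0 ≤ a ∧ a < 10 := by
  unfold adj at ha
  split_ifs at ha <;> simp_all <;> omega

theorem replicate_eq_specTab (m : Nat) :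
    List.replicate 10 (List.replicate m (0:Int)) = specTab m 0 := by
  unfold specTab specRow
  have hrow : ∀ d : Nat, (List.range m).map (fun L => if L ≤ 0 then f L d else 0) = List.replicate m 0 := by
    intro d
    rw [show (fun L => if L ≤ 0 then f L d else 0) = (fun _ : Nat => (0:Int)) from ?_]
    · simp [List.map_const']
    · funext L; rcases Nat.eq_zero_or_pos L with h | h <;> simp [h]
      · rfl
      · omega
  simp only [hrow]
  simp [List.map_const']

theorem specRow_getD (m ℓ d L : Nat) (h1 : L < m) (h2 : L ≤ ℓ) :
    (specRow m ℓ d).getD L 0 = f L d := by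
  unfold specRow
  rw [PySem.List.getD_map_range _ _ _ _ h1]
  simp [h2]

theorem A_init_pos (n : Int) (hn : 1 ≤ n) (m : Nat) :
    (List.range 10).foldl (fun t numero =>
        let t' := tSet t numero 0 0
        if 1 ≤ n then tSet t' numero 1 1 else t')
      (List.replicate 10 (List.replicate m (0:Int))) = specTab m 1 := by
  rw [replicate_eq_specTab]
  unfold specTab
  rw [foldl_modify 10 (specRow m 0) (fun _ r => (r.set 0 0).set 1 1) _ ?hf 10 (by omega)]
  case hf =>
    intro t d
    simp only [hn, if_pos, tSet, List.modify_modify_eq]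
    rfl
  apply List.map_congr_left
  intro d hd
  simp only [List.mem_range] at hd
  simp only [hd, if_pos]
  unfold specRow
  rw [set_map_range, set_map_range]
  apply List.map_congr_left
  intro L _
  rcases Nat.lt_or_ge L 2 with h | h
  · interval_cases L <;> simp <;> rfl
  · have h1 : L ≠ 1 := by omega
    have h0 : L ≠ 0 := by omega
    simp [h0, h1]
    omega

theorem inner_fold (m ℓ : Nat) (hℓ : 1 ≤ ℓ) (hm : ℓ < m) :
    ∀ k, k ≤ 10 →
      (List.range k).foldl (fun t numero =>
          tSet t numero (ℓ+1) (((adj (numero : Int)).map (fun a => tGet t a.toNat ℓ)).sum))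
        (specTab m ℓ)
      = (List.range 10).map (fun d => specRow m (if d < k then ℓ+1 else ℓ) d) := by
  intro k
  induction k with
  | zero => simp [specTab]
  | succ k ih =>
    intro hk
    rw [List.range_succ, List.foldl_append, ih (by omega)]
    simp only [List.foldl_cons, List.foldl_nil]
    have hval : ((adj (k : Int)).map (fun a =>
        tGet ((List.range 10).map (fun d => specRow m (if d < k then ℓ+1 else ℓ) d)) a.toNat ℓ)).sum
        = f (ℓ+1) k := by
      rw [f_succ ℓ hℓ k]
      congr 1
      apply List.map_congr_left
      intro a ha
      obtain ⟨ha0, ha10⟩ := adj_mem_bounds k a ha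
      have h10 : a.toNat < 10 := by omega
      unfold tGet
      rw [PySem.List.getD_map_range _ _ _ _ h10]
      split_ifs <;> exact specRow_getD m _ _ ℓ hm (by omega)
    rw [hval]
    unfold tSet
    rw [modify_map_range]
    apply List.map_congr_left
    intro d hd
    simp only [List.mem_range] at hd
    by_cases hdk : d = k
    · subst hdk
      simp only [lt_irrefl, if_pos (Nat.lt_succ_self d)]
      unfold specRow
      rw [set_map_range]
      apply List.map_congr_left
      intro L _
      split_ifs with h1 h2 <;> first | rfl | omega | (rw [h1])
    · by_cases hlt : d < k
      · simp [hdk, hlt, Nat.lt_succ_of_lt hlt]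
      · have : ¬ d < k + 1 := by omega
        simp [hdk, hlt, this]

theorem A_loop (n : Int) (hn : 1 ≤ n) :
    ∀ (k : Nat) (a : Int), 2 ≤ a → a ≤ n + 1 → (n + 1 - a).toNat = k →
      (PySem.List.pyRange a (n+1) 1).foldl (fun t longitud =>
          (List.range 10).foldl (fun t numero =>
            tSet t numero longitud.toNat
              (((adj (numero : Int)).map (fun aa => tGet t aa.toNat (longitud-1).toNat)).sum)) t)
        (specTab (n+1).toNat (a-1).toNat)
      = specTab (n+1).toNat n.toNat := by
  intro k
  induction k with
  | zero =>
    intro a h2 hle hk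
    have ha : a = n + 1 := by omega
    subst ha
    rw [PySem.List.pyRange_one_eq_nil (le_refl _)]
    simp only [List.foldl_nil]
    congr 1
    omega
  | succ k ih =>
    intro a h2 hle hk
    have hlt : a < n + 1 := by omega
    rw [PySem.List.pyRange_one_cons hlt]
    simp only [List.foldl_cons]
    have hℓ : (a - 1).toNat + 1 = a.toNat := by omega
    have hstep : (List.range 10).foldl (fun t numero =>
        tSet t numero a.toNat
          (((adj (numero : Int)).map (fun aa => tGet t aa.toNat (a-1).toNat)).sum))
        (specTab (n+1).toNat (a-1).toNat)
      = specTab (n+1).toNat a.toNat := by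
      rw [← hℓ]
      rw [inner_fold (n+1).toNat ((a-1).toNat) (by omega) (by omega) 10 (le_refl _)]
      apply List.map_congr_left
      intro d hd
      simp only [List.mem_range] at hd
      simp [hd]
    rw [hstep]
    have := ih (a+1) (by omega) (by omega) (by omega)
    rw [show ((a:Int)+1-1).toNat = a.toNat by omega] at this
    exact this

theorem A_eq (n : Int) (hn : 0 ≤ n) : c_optimos n = specTab (n+1).toNat n.toNat := by
  rcases Int.lt_or_le n 1 with h | h
  · have : n = 0 := by omega
    subst this
    decide
  · unfold c_optimos
    dsimp only
    rw [A_init_pos n h]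
    have := A_loop n h (n-1).toNat 2 (by omega) (by omega) (by omega)
    rw [show ((2:Int)-1).toNat = 1 by rfl] at this
    exact this

-- ===== B-side lemmas: symmetry and the scalar state vector =====

-- the three mirror symmetries of the keypad graph
theorem f_sym : ∀ L, f L 3 = f L 1 ∧ f L 9 = f L 7 ∧ f L 6 = f L 4
  | 0 => ⟨rfl, rfl, rfl⟩
  | 1 => ⟨rfl, rfl, rfl⟩
  | (k+2) => by
    obtain ⟨h3, h9, h6⟩ := f_sym (k+1)
    refine ⟨?_, ?_, ?_⟩ <;> simp [f, adj] <;> omega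

-- the state vector B maintains: [a,b,c,p,q,z,m]
def gvec (L : Nat) : List Int := [f L 1, f L 7, f L 4, f L 2, f L 8, f L 0, f L 5]

def colsUpTo (ℓ : Nat) : List (List Int) := (List.range (ℓ+1)).map gvec

theorem gvec_step (ℓ : Nat) (hℓ : 1 ≤ ℓ) :
    [(gvec ℓ).getD 3 0 + (gvec ℓ).getD 2 0,
     (gvec ℓ).getD 2 0 + (gvec ℓ).getD 4 0,
     (gvec ℓ).getD 0 0 + (gvec ℓ).getD 6 0 + (gvec ℓ).getD 1 0,
     2*(gvec ℓ).getD 0 0 + (gvec ℓ).getD 6 0,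
     2*(gvec ℓ).getD 1 0 + (gvec ℓ).getD 6 0 + (gvec ℓ).getD 5 0,
     (gvec ℓ).getD 4 0,
     (gvec ℓ).getD 3 0 + (gvec ℓ).getD 4 0 + 2*(gvec ℓ).getD 2 0] = gvec (ℓ+1) := by
  obtain ⟨h3, h9, h6⟩ := f_sym ℓ
  unfold gvec
  simp only [List.getD]
  have e1 := f_succ ℓ hℓ 1
  have e7 := f_succ ℓ hℓ 7
  have e4 := f_succ ℓ hℓ 4
  have e2 := f_succ ℓ hℓ 2
  have e8 := f_succ ℓ hℓ 8
  have e0 := f_succ ℓ hℓ 0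
  have e5 := f_succ ℓ hℓ 5
  simp [adj] at e1 e7 e4 e2 e8 e0 e5
  simp only [e1, e7, e4, e2, e8, e0, e5]
  norm_num
  refine ⟨by omega, by omega, by omega, by omega⟩

theorem B_loop (n : Int) (hn : 1 ≤ n) :
    ∀ (k : Nat) (a : Int), 2 ≤ a → a ≤ n + 1 → (n + 1 - a).toNat = k →
      (PySem.List.pyRange a (n+1) 1).foldl (fun sts _ =>
          sts ++ [[sts.getLast!.getD 3 0 + sts.getLast!.getD 2 0,
                   sts.getLast!.getD 2 0 + sts.getLast!.getD 4 0,
                   sts.getLast!.getD 0 0 + sts.getLast!.getD 6 0 + sts.getLast!.getD 1 0,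
                   2*sts.getLast!.getD 0 0 + sts.getLast!.getD 6 0,
                   2*sts.getLast!.getD 1 0 + sts.getLast!.getD 6 0 + sts.getLast!.getD 5 0,
                   sts.getLast!.getD 4 0,
                   sts.getLast!.getD 3 0 + sts.getLast!.getD 4 0 + 2*sts.getLast!.getD 2 0]])
        (colsUpTo (a-1).toNat)
      = colsUpTo n.toNat := by
  intro k
  induction k with
  | zero =>
    intro a h2 hle hk
    have ha : a = n + 1 := by omega
    subst ha
    rw [PySem.List.pyRange_one_eq_nil (le_refl _)]
    simp only [List.foldl_nil]
    congr 1
    omega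
  | succ k ih =>
    intro a h2 hle hk
    have hlt : a < n + 1 := by omega
    rw [PySem.List.pyRange_one_cons hlt]
    simp only [List.foldl_cons]
    have hlast : (colsUpTo (a-1).toNat).getLast! = gvec (a-1).toNat := by
      unfold colsUpTo
      rw [List.range_succ, List.map_append]
      simp
    have hstep : colsUpTo (a-1).toNat ++ [[(colsUpTo (a-1).toNat).getLast!.getD 3 0 + (colsUpTo (a-1).toNat).getLast!.getD 2 0,
                   (colsUpTo (a-1).toNat).getLast!.getD 2 0 + (colsUpTo (a-1).toNat).getLast!.getD 4 0,
                   (colsUpTo (a-1).toNat).getLast!.getD 0 0 + (colsUpTo (a-1).toNat).getLast!.getD 6 0 + (colsUpTo (a-1).toNat).getLast!.getD 1 0,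
                   2*(colsUpTo (a-1).toNat).getLast!.getD 0 0 + (colsUpTo (a-1).toNat).getLast!.getD 6 0,
                   2*(colsUpTo (a-1).toNat).getLast!.getD 1 0 + (colsUpTo (a-1).toNat).getLast!.getD 6 0 + (colsUpTo (a-1).toNat).getLast!.getD 5 0,
                   (colsUpTo (a-1).toNat).getLast!.getD 4 0,
                   (colsUpTo (a-1).toNat).getLast!.getD 3 0 + (colsUpTo (a-1).toNat).getLast!.getD 4 0 + 2*(colsUpTo (a-1).toNat).getLast!.getD 2 0]]
        = colsUpTo ((a-1).toNat + 1) := by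
      rw [hlast, gvec_step (a-1).toNat (by omega)]
      unfold colsUpTo
      simp [List.range_succ]
    rw [hstep]
    have := ih (a+1) (by omega) (by omega) (by omega)
    rw [show ((a:Int)+1-1).toNat = (a-1).toNat + 1 by omega] at this
    exact this

theorem gvec_sel (L d : Nat) (hd : d < 10) :
    (gvec L).getD (varOf.getD d 0) 0 = f L d := by
  obtain ⟨h3, h9, h6⟩ := f_sym L
  interval_cases d <;> simp [varOf, gvec, List.getD] <;> omega

theorem B_eq (n : Int) (hn : 0 ≤ n) :
    c_optimos_alt n
    = (List.range 10).map (fun d => (List.range (n+1).toNat).map (fun L => f L d)) := by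
  rcases Int.lt_or_le n 1 with h | h
  · have : n = 0 := by omega
    subst this
    decide
  · unfold c_optimos_alt
    dsimp only
    rw [if_pos h]
    have hbase : ([List.replicate 7 (0:Int)] ++ [List.replicate 7 (1:Int)]) = colsUpTo 1 := by decide
    rw [hbase]
    have hloop := B_loop n h (n-1).toNat 2 (by omega) (by omega) (by omega)
    rw [show ((2:Int)-1).toNat = 1 by rfl] at hloop
    rw [hloop]
    apply List.map_congr_left
    intro d hd
    simp only [List.mem_range] at hd
    unfold colsUpTo
    rw [List.map_map]
    rw [show (n+1).toNat = n.toNat + 1 by omega]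
    apply List.map_congr_left
    intro L _
    simp only [Function.comp_apply]
    exact gvec_sel L d hd

theorem AB (n : Int) (hn : 0 ≤ n) : c_optimos n = c_optimos_alt n := by
  rw [A_eq n hn, B_eq n hn]
  unfold specTab
  apply List.map_congr_left
  intro d _
  unfold specRow
  apply List.map_congr_left
  intro L hL
  simp only [List.mem_range] at hL
  have : L ≤ n.toNat := by omega
  simp [this]

-- ===== VERDICT (by name: the statement is the Claim_ definition above) =====
theorem c_optimos_spec : Claim_equal_c_optimos := by
  intro n _ hpre
  unfold Spec_c_optimos
  exact AB n hpre
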